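-- pv_equiv track=rewrite | github.com/theKidOfArcrania/ctf-writeups | 2019/asis19/medias/solve.py | numbcheck
-- ===== SOURCE A (Python) =====
-- def numbcheck(num):
--     n = []
--     for c in num:
--         c = ord(c)
--         if not (0x30 <= c <= 0x39):
--             return False
--         n.append(c-0x30)
--     for i in range(1, len(num) - 1):
--         if n[i-1] == 0:
--             return False
--         #if n[i+1] + n[i-1] <= 2*n[i]:
--         if n[i+1] - n[i] <= n[i] - n[i-1]:
--             return False
--     return True
-- ===== SOURCE B (Python) =====
-- def numbcheck(num):
--     prev2 = prev1 = None
--     for ch in num: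
--         c = ord(ch)
--         if not (0x30 <= c <= 0x39):
--             return False
--         d = c - 0x30
--         if prev2 is not None:
--             if prev2 == 0 or d - prev1 <= prev1 - prev2:
--                 return False
--         prev2, prev1 = prev1, d
--     return True
-- ===== Notes on version B (the rewrite author's own statement) =====
-- stated objective: simpler
-- what changed: Single forward pass carrying only the two previous digit values (prev2, prev1) and checking each triple on the fly, instead of building an intermediate digit list and re-scanning it by index in a second loop.
import Mathlib
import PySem

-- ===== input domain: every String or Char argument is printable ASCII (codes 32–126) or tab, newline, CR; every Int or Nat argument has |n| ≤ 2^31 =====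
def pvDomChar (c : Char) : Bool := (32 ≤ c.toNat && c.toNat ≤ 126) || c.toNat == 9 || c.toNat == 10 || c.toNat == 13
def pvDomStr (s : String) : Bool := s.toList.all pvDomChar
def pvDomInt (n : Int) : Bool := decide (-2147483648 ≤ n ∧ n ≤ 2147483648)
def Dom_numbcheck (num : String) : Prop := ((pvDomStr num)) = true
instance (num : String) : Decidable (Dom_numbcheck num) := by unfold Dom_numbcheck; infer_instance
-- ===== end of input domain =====

-- B is a single pass keeping only the two previous digits (O(1) space, one scan)
-- instead of A's build-a-list-then-rescan-by-index; same return value everywhere.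

-- ===== PORT A =====
-- first loop of A: build the digit list, none = early `return False` on a non-digit
def pvBuildA (cs : List Char) : Option (List Int) :=
  match cs with
  | [] => some []
  | c :: rest =>
    let cv : Int := (c.toNat : Int)
    if 0x30 ≤ cv ∧ cv ≤ 0x39 then
      (pvBuildA rest).map (fun n => (cv - 0x30) :: n)
    else none

-- second loop of A: for i in range(1, len(num)-1), indexing the digit list
def pvCheckA (n : List Int) (idxs : List Int) : Bool :=
  match idxs with
  | [] => true
  | i :: rest =>
    if PySem.List.pyGetD n (i - 1) 0 == 0 then false
    else if PySem.List.pyGetD n (i + 1) 0 - PySem.List.pyGetD n i 0 ≤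
            PySem.List.pyGetD n i 0 - PySem.List.pyGetD n (i - 1) 0 then false
    else pvCheckA n rest

def numbcheck (num : String) : Bool :=
  match pvBuildA num.toList with
  | none => false
  | some n => pvCheckA n (PySem.List.pyRange 1 ((num.toList.length : Int) - 1) 1)

-- ===== PORT B =====
-- single pass; prev2/prev1 are `none` until two digits have been seen
def pvLoopB (prev2 prev1 : Option Int) (cs : List Char) : Bool :=
  match cs with
  | [] => true
  | c :: rest =>
    let cv : Int := (c.toNat : Int)
    if 0x30 ≤ cv ∧ cv ≤ 0x39 then
      let d : Int := cv - 0x30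
      match prev2, prev1 with
      | some a, some b =>
        if a == 0 ∨ d - b ≤ b - a then false
        else pvLoopB (some b) (some d) rest
      | _, _ => pvLoopB prev1 (some d) rest
    else false

def numbcheck_alt (num : String) : Bool := pvLoopB none none num.toList

-- ===== PRECONDITION & SPEC =====
def Spec_numbcheck (num : String) (out : Bool) : Prop := out = numbcheck_alt num
instance (num : String) (out : Bool) : Decidable (Spec_numbcheck num out) := by unfold Spec_numbcheck; infer_instance

-- ===== CLAIM (what is proved, stated in full; the proofs are below) =====
def Claim_equal_numbcheck : Prop := ∀ (num : String), Dom_numbcheck num → Spec_numbcheck num (numbcheck num)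

-- ===== LEMMAS AND PROOFS =====

-- proof-only characterisation: the convexity/zero guard on consecutive digit triples
def pvGood : List Int → Bool
  | a :: b :: c :: r => if a == 0 ∨ c - b ≤ b - a then false else pvGood (b :: c :: r)
  | _ => true

theorem pvBuildA_length (cs : List Char) (n : List Int) (h : pvBuildA cs = some n) :
    n.length = cs.length := by
  induction cs generalizing n with
  | nil => simp [pvBuildA] at h; simp [← h]
  | cons c rest ih =>
    simp only [pvBuildA] at h
    split at h
    · rcases Option.map_eq_some_iff.mp h with ⟨m, hm, rfl⟩
      simp [ih m hm]
    · exact absurd h (by simp)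

theorem pvCheckA_eq_good (fuel : Nat) : ∀ (n : List Int) (j : Nat), n.length ≤ j + fuel →
    pvCheckA n (PySem.List.pyRange ((j : Int) + 1) ((n.length : Int) - 1) 1) =
      pvGood (n.drop j) := by
  induction fuel with
  | zero =>
    intro n j h
    have hd : n.drop j = [] := List.drop_eq_nil_of_le (by omega)
    rw [PySem.List.pyRange_one_eq_nil (by omega), hd]
    rfl
  | succ fuel ih =>
    intro n j h
    by_cases hlen : j + 2 < n.length
    · -- three elements available at j, j+1, j+2
      have h0 : j < n.length := by omega
      have h1 : j + 1 < n.length := by omega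
      have h2 : j + 2 < n.length := by omega
      rw [PySem.List.pyRange_one_cons (by push_cast; omega)]
      have g0 : PySem.List.pyGetD n (((j : Int) + 1) - 1) 0 = n[j] := by
        rw [show ((j : Int) + 1) - 1 = ((j : Nat) : Int) by push_cast; ring,
          PySem.List.pyGetD_natCast, List.getD_eq_getElem _ _ h0]
      have g1 : PySem.List.pyGetD n ((j : Int) + 1) 0 = n[j + 1] := by
        rw [show ((j : Int) + 1) = ((j + 1 : Nat) : Int) by push_cast; ring,
          PySem.List.pyGetD_natCast, List.getD_eq_getElem _ _ h1]
      have g2 : PySem.List.pyGetD n (((j : Int) + 1) + 1) 0 = n[j + 2] := by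
        rw [show ((j : Int) + 1) + 1 = ((j + 2 : Nat) : Int) by push_cast; ring,
          PySem.List.pyGetD_natCast, List.getD_eq_getElem _ _ h2]
      have hdrop : n.drop j = n[j] :: n[j+1] :: n[j+2] :: n.drop (j + 3) := by
        rw [List.drop_eq_getElem_cons h0, List.drop_eq_getElem_cons h1,
          List.drop_eq_getElem_cons h2]
      have hdrop1 : n.drop (j + 1) = n[j+1] :: n[j+2] :: n.drop (j + 3) := by
        rw [List.drop_eq_getElem_cons h1, List.drop_eq_getElem_cons h2]
      rw [hdrop]
      simp only [pvCheckA, pvGood, g0, g1, g2]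
      by_cases hz : n[j] = 0
      · simp [hz]
      · by_cases hc : n[j+2] - n[j+1] ≤ n[j+1] - n[j]
        · simp [hz, hc]
        · have := ih n (j + 1) (by omega)
          rw [hdrop1] at this
          simp only [hz, hc, decide_false, bne_iff_ne, ne_eq, not_false_eq_true, if_false,
            or_self, Bool.false_eq_true, decide_eq_true_eq, if_neg, Bool.not_false,
            Bool.true_and]
          simpa [hz, hc, show ((j + 1 : Nat) : Int) + 1 = ((j : Int) + 1) + 1 by push_cast; ring]
            using this
    · -- fewer than three elements from j on: both sides are true
      have hd : pvGood (n.drop j) = true := by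
        have hlen' : (n.drop j).length ≤ 2 := by simp; omega
        match hm : n.drop j with
        | [] => rfl
        | [_] => rfl
        | [_, _] => rfl
        | _ :: _ :: _ :: _ => rw [hm] at hlen'; simp at hlen'
      rw [PySem.List.pyRange_one_eq_nil (by push_cast; omega), hd]
      rfl

-- B-side: with two remembered digits a, b, the single pass computes pvGood (a :: b :: digits)
theorem pvLoopB_some_some (cs : List Char) : ∀ (a b : Int),
    pvLoopB (some a) (some b) cs =
      (match pvBuildA cs with
       | none => false
       | some n => pvGood (a :: b :: n)) := by
  induction cs with
  | nil => intro a b; rfl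
  | cons c rest ih =>
    intro a b
    simp only [pvLoopB, pvBuildA]
    by_cases hdig : (0x30 : Int) ≤ (c.toNat : Int) ∧ (c.toNat : Int) ≤ 0x39
    · rw [if_pos hdig, if_pos hdig]
      by_cases hg : (a == 0) = true ∨ (c.toNat : Int) - 0x30 - b ≤ b - a
      · rw [if_pos hg]
        cases hrest : pvBuildA rest with
        | none => rfl
        | some m =>
          simp only [Option.map_some]
          rw [pvGood, if_pos hg]
      · rw [if_neg hg, ih b ((c.toNat : Int) - 0x30)]
        cases hrest : pvBuildA rest with
        | none => rfl
        | some m =>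
          simp only [Option.map_some]
          rw [pvGood, if_neg hg]
    · rw [if_neg hdig, if_neg hdig]

theorem pvLoopB_none_some (cs : List Char) (b : Int) :
    pvLoopB none (some b) cs =
      (match pvBuildA cs with
       | none => false
       | some n => pvGood (b :: n)) := by
  cases cs with
  | nil => rfl
  | cons c rest =>
    simp only [pvLoopB, pvBuildA]
    by_cases hdig : (0x30 : Int) ≤ (c.toNat : Int) ∧ (c.toNat : Int) ≤ 0x39
    · rw [if_pos hdig, if_pos hdig, pvLoopB_some_some rest b ((c.toNat : Int) - 0x30)]
      cases hrest : pvBuildA rest with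
      | none => rfl
      | some m => rfl
    · rw [if_neg hdig, if_neg hdig]

theorem pvLoopB_none_none (cs : List Char) :
    pvLoopB none none cs =
      (match pvBuildA cs with
       | none => false
       | some n => pvGood n) := by
  cases cs with
  | nil => rfl
  | cons c rest =>
    simp only [pvLoopB, pvBuildA]
    by_cases hdig : (0x30 : Int) ≤ (c.toNat : Int) ∧ (c.toNat : Int) ≤ 0x39
    · rw [if_pos hdig, if_pos hdig, pvLoopB_none_some rest ((c.toNat : Int) - 0x30)]
      cases hrest : pvBuildA rest with
      | none => rfl
      | some m => rfl
    · rw [if_neg hdig, if_neg hdig]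

-- ===== VERDICT (by name: the statement is the Claim_ definition above) =====
theorem numbcheck_spec : Claim_equal_numbcheck := by
  intro num _
  unfold Spec_numbcheck numbcheck numbcheck_alt
  rw [pvLoopB_none_none]
  cases hb : pvBuildA num.toList with
  | none => rfl
  | some n =>
    have hlen := pvBuildA_length _ _ hb
    have := pvCheckA_eq_good n.length n 0 (by omega)
    simp only [List.drop_zero, Nat.cast_zero, zero_add] at this
    rw [← hlen]
    simpa using this
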